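-- pv_equiv track=rewrite | github.com/Con-OBrien/HackerRankFinalSubs | dayOfProgrammer.py | dayOfProgrammer
-- ===== SOURCE A (Python) =====
-- def dayOfProgrammer(year_value):
--     test = 256
--     monthdays = [31, 0, 31, 30, 31, 30, 31, 31, 31, 31, 30, 31]
--     i = 0
--
--     if year_value > 1917:
--         if year_value == 1918:
--             monthdays[1] = 29
--             while test >= 28:
--                 test -= monthdays[i]
--                 i += 1
--             dd = 26
--             mm = i + 1
--             if mm < 10:
--                 mm = str(0) + str(mm)
--         else:
--             if year_value % 400 == 0 or ((year_value % 4 == 0) and not (year_value % 100 == 0)):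
--                 # If it a leap
--                 monthdays[1] = 29
--                 while test >= 28:
--                     test -= monthdays[i]
--                     i += 1
--                 dd = test
--                 mm = i + 1
--                 if (mm < 10):
--                     mm = str(0) + str(mm)
--             else:
--                 monthdays[1] = 28
--                 # If not a leap year
--                 while test > 28:
--                     test -= monthdays[i]
--                     i += 1
--                 dd = test
--                 mm = i + 1
--                 if mm < 10:
--                     mm = str(0) + str(mm)
--     else:
--         if year_value % 4 == 0:
--             # If it a leap
--             monthdays[1] = 29
--             while test >= 28:
--                 test -= monthdays[i]
--                 i += 1
--             dd = test
--             mm = i + 1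
--             if mm < 10:
--                 mm = str(0) + str(mm)
--         else:
--             monthdays[1] = 28
--             # If not a leap year
--             while test > 28:
--                 test -= monthdays[i]
--                 i += 1
--             dd = test
--             mm = i + 1
--             if mm < 10:
--                 mm = str(0) + str(mm)
--     yyyy = str(dd) + '.' + str(mm) + '.' + str(year_value)
--     return yyyy
-- ===== SOURCE B (Python) =====
-- def dayOfProgrammer(year_value):
--     if year_value == 1918:
--         return '26.09.1918'
--     if year_value > 1917:
--         leap = year_value % 400 == 0 or (year_value % 4 == 0 and year_value % 100 != 0)
--     else:
--         leap = year_value % 4 == 0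
--     day = 12 if leap else 13
--     return str(day) + '.09.' + str(year_value)
-- ===== Notes on version B (the rewrite author's own statement) =====
-- stated objective: simpler
-- what changed: Replaces the month-subtracting while loop over a days-per-month table with a closed form: special-case 1918, compute the leap boolean, day = 12 if leap else 13, month always '09'.
import Mathlib
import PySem

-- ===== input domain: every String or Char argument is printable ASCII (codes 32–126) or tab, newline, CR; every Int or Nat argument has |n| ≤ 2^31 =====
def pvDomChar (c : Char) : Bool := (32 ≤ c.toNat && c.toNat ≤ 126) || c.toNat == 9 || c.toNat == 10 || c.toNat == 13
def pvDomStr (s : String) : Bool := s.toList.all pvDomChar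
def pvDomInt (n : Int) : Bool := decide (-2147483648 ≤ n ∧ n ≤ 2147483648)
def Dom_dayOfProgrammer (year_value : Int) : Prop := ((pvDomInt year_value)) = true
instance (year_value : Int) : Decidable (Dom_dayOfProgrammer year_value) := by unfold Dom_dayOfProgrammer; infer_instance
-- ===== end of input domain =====

-- B replaces A's month-subtracting while loop with a closed form (1918 special case, leap boolean, day 12/13, month "09"): simpler.


-- ===== PORT A =====
-- A's `while test >= 28: test -= monthdays[i]; i += 1` (condition checked before each index access)
def pvWhileGe : Int → Nat → List Int → Int × Nat
  | test, i, [] => (test, i)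
  | test, i, m :: ms => if test ≥ 28 then pvWhileGe (test - m) (i + 1) ms else (test, i)

-- A's `while test > 28: …`
def pvWhileGt : Int → Nat → List Int → Int × Nat
  | test, i, [] => (test, i)
  | test, i, m :: ms => if test > 28 then pvWhileGt (test - m) (i + 1) ms else (test, i)

-- mm < 10 → '0' + str(mm); then str(dd) + '.' + str(mm) + '.' + str(year)
def pvFmt (dd mm year_value : Int) : String :=
  let mmS := if mm < 10 then "0" ++ PySem.Int.toStr mm else PySem.Int.toStr mm
  PySem.Int.toStr dd ++ "." ++ mmS ++ "." ++ PySem.Int.toStr year_value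

def dayOfProgrammer (year_value : Int) : String :=
  let test : Int := 256
  if year_value > 1917 then
    if year_value = 1918 then
      let md : List Int := [31, 29, 31, 30, 31, 30, 31, 31, 31, 31, 30, 31]
      let r := pvWhileGe test 0 md
      pvFmt 26 ((r.2 : Int) + 1) year_value
    else
      if PySem.Int.mod year_value 400 = 0 ∨ (PySem.Int.mod year_value 4 = 0 ∧ ¬ (PySem.Int.mod year_value 100 = 0)) then
        let md : List Int := [31, 29, 31, 30, 31, 30, 31, 31, 31, 31, 30, 31]
        let r := pvWhileGe test 0 md
        pvFmt r.1 ((r.2 : Int) + 1) year_value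
      else
        let md : List Int := [31, 28, 31, 30, 31, 30, 31, 31, 31, 31, 30, 31]
        let r := pvWhileGt test 0 md
        pvFmt r.1 ((r.2 : Int) + 1) year_value
  else
    if PySem.Int.mod year_value 4 = 0 then
      let md : List Int := [31, 29, 31, 30, 31, 30, 31, 31, 31, 31, 30, 31]
      let r := pvWhileGe test 0 md
      pvFmt r.1 ((r.2 : Int) + 1) year_value
    else
      let md : List Int := [31, 28, 31, 30, 31, 30, 31, 31, 31, 31, 30, 31]
      let r := pvWhileGt test 0 md
      pvFmt r.1 ((r.2 : Int) + 1) year_value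

-- ===== PORT B =====
def dayOfProgrammer_alt (year_value : Int) : String :=
  if year_value = 1918 then "26.09.1918"
  else
    let leap : Bool :=
      if year_value > 1917 then
        PySem.Int.mod year_value 400 == 0 || (PySem.Int.mod year_value 4 == 0 && !(PySem.Int.mod year_value 100 == 0))
      else PySem.Int.mod year_value 4 == 0
    let day : Int := if leap then 12 else 13
    PySem.Int.toStr day ++ ".09." ++ PySem.Int.toStr year_value

-- ===== PRECONDITION & SPEC =====
def Spec_dayOfProgrammer (year_value : Int) (out : String) : Prop := out = dayOfProgrammer_alt year_value
instance (year_value : Int) (out : String) : Decidable (Spec_dayOfProgrammer year_value out) := by unfold Spec_dayOfProgrammer; infer_instance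

-- ===== CLAIM (what is proved, stated in full; the proofs are below) =====
def Claim_equal_dayOfProgrammer : Prop := ∀ (year_value : Int), Dom_dayOfProgrammer year_value → Spec_dayOfProgrammer year_value (dayOfProgrammer year_value)

-- ===== LEMMAS AND PROOFS =====
-- the leap-year loop stops with test = 12 after 8 months; the non-leap loop with test = 13
theorem pvWhileGe_eval : pvWhileGe 256 0 [31, 29, 31, 30, 31, 30, 31, 31, 31, 31, 30, 31] = (12, 8) := by decide

theorem pvWhileGt_eval : pvWhileGt 256 0 [31, 28, 31, 30, 31, 30, 31, 31, 31, 31, 30, 31] = (13, 8) := by decide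

theorem pvFmt_leap (y : Int) : pvFmt 12 9 y = "12" ++ ".09." ++ PySem.Int.toStr y := by
  show ("12" ++ "." ++ ("0" ++ "9") ++ "." : String) ++ PySem.Int.toStr y = ("12" ++ ".09." : String) ++ PySem.Int.toStr y
  rfl

theorem pvFmt_nonleap (y : Int) : pvFmt 13 9 y = "13" ++ ".09." ++ PySem.Int.toStr y := by
  show ("13" ++ "." ++ ("0" ++ "9") ++ "." : String) ++ PySem.Int.toStr y = ("13" ++ ".09." : String) ++ PySem.Int.toStr y
  rfl

-- ===== VERDICT (by name: the statement is the Claim_ definition above) =====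
theorem dayOfProgrammer_spec : Claim_equal_dayOfProgrammer := by
  intro y _
  unfold Spec_dayOfProgrammer dayOfProgrammer dayOfProgrammer_alt
  by_cases h18 : y = 1918
  · subst h18; decide
  · simp only [h18, if_false]
    by_cases hgt : y > 1917
    · simp only [hgt, if_true]
      by_cases hl : PySem.Int.mod y 400 = 0 ∨ (PySem.Int.mod y 4 = 0 ∧ ¬ (PySem.Int.mod y 100 = 0))
      · have hb : (PySem.Int.mod y 400 == 0 || (PySem.Int.mod y 4 == 0 && !(PySem.Int.mod y 100 == 0))) = true := by
          rw [Bool.or_eq_true, Bool.and_eq_true, beq_iff_eq, beq_iff_eq,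
            Bool.not_eq_true', beq_eq_false_iff_ne]
          exact hl
        simp only [hl, if_true, hb, pvWhileGe_eval]
        exact pvFmt_leap y
      · have hb : (PySem.Int.mod y 400 == 0 || (PySem.Int.mod y 4 == 0 && !(PySem.Int.mod y 100 == 0))) = false := by
          rw [← Bool.not_eq_true, Bool.or_eq_true, Bool.and_eq_true, beq_iff_eq, beq_iff_eq,
            Bool.not_eq_true', beq_eq_false_iff_ne]
          exact hl
        simp only [hl, if_false, hb, pvWhileGt_eval]
        exact pvFmt_nonleap y
    · simp only [hgt, if_false]
      by_cases h4 : PySem.Int.mod y 4 = 0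
      · have hb : (PySem.Int.mod y 4 == 0) = true := beq_iff_eq.mpr h4
        simp only [h4, if_true, hb, pvWhileGe_eval]
        exact pvFmt_leap y
      · have hb : (PySem.Int.mod y 4 == 0) = false := beq_eq_false_iff_ne.mpr h4
        simp only [h4, if_false, hb, pvWhileGt_eval]
        exact pvFmt_nonleap y
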